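-- pv_equiv track=rewrite | github.com/talescostam/PythonLessons | Python1/PrimeiroProjeto/criptografia2.py | cifrar_mensagem
-- ===== SOURCE A (Python) =====
-- def cifrar_mensagem(mensagem):
--     mensagem_cifrada = ''
--     for caractere in mensagem:
--         if caractere.isalpha():
--             base = ord('a') if caractere.islower() else ord('A')
--             novo_caractere = chr((ord(caractere) - base + 5) % 26 + base)
--             mensagem_cifrada += novo_caractere
--         elif caractere.isdigit():
--             novo_digito = str((int(caractere) + 5) % 10)
--             mensagem_cifrada += novo_digito
--         else:
--             mensagem_cifrada += caractere
--     return mensagem_cifrada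
-- ===== SOURCE B (Python) =====
-- _SRC = "abcdefghijklmnopqrstuvwxyzABCDEFGHIJKLMNOPQRSTUVWXYZ0123456789"
-- _DST = "fghijklmnopqrstuvwxyzabcdeFGHIJKLMNOPQRSTUVWXYZABCDE5678901234"
-- _TABLE = str.maketrans(_SRC, _DST)
--
--
-- def cifrar_mensagem(mensagem):
--     return mensagem.translate(_TABLE)
-- ===== Notes on version B (the rewrite author's own statement) =====
-- stated objective: idiomatic
-- what changed: Replaced the per-character if/elif arithmetic loop by a translation table built once with str.maketrans and a single mensagem.translate(table) call.
import Mathlib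
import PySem

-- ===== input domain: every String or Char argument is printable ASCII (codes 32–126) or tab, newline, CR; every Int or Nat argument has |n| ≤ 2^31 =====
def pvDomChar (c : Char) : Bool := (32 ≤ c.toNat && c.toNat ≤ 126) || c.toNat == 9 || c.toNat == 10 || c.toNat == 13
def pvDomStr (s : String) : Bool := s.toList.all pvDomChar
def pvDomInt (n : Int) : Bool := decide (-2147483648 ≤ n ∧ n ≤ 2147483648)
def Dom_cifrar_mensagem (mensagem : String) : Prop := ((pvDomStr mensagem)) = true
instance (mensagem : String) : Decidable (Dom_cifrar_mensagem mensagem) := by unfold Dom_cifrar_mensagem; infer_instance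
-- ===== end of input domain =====

-- B replaces A's per-character if/elif arithmetic by one precomputed translation table
-- (str.maketrans) and a single translate call; idiomatic, same cost, return value identical.

-- ===== PORT A =====
-- the chunk A's loop body appends for one character (the if/elif/else, in A's order)
def cifrarChunkA (c : Char) : List Char :=
  if PySem.Chars.isalpha c then
    let base : Int := if PySem.Chars.islower c then ('a').toNat else ('A').toNat
    [Char.ofNat (PySem.Int.mod ((c.toNat : Int) - base + 5) 26 + base).toNat]
  else if PySem.Chars.isdigit c then
    -- int(caractere): the branch guarantees a digit, so ofChars? is some; getD's 0 is unreachable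
    PySem.Int.toChars (PySem.Int.mod ((PySem.Int.ofChars? [c]).getD 0 + 5) 10)
  else [c]

def cifrar_mensagem (mensagem : String) : String :=
  String.mk (mensagem.toList.foldl (fun acc c => acc ++ cifrarChunkA c) [])

-- ===== PORT B =====
def cifrarTable : PySem.Dict Char Char :=
  PySem.Dict.ofList
    (List.zip "abcdefghijklmnopqrstuvwxyzABCDEFGHIJKLMNOPQRSTUVWXYZ0123456789".toList
              "fghijklmnopqrstuvwxyzabcdeFGHIJKLMNOPQRSTUVWXYZABCDE5678901234".toList)

-- mensagem.translate(table): per-character table lookup, unmapped characters pass through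
def cifrar_mensagem_alt (mensagem : String) : String :=
  String.mk (mensagem.toList.map (fun c => (cifrarTable.get? c).getD c))

-- ===== PRECONDITION & SPEC =====
def Spec_cifrar_mensagem (mensagem : String) (out : String) : Prop := out = cifrar_mensagem_alt mensagem
instance (mensagem : String) (out : String) : Decidable (Spec_cifrar_mensagem mensagem out) := by unfold Spec_cifrar_mensagem; infer_instance

-- ===== CLAIM (what is proved, stated in full; the proofs are below) =====
def Claim_equal_cifrar_mensagem : Prop := ∀ (mensagem : String), Dom_cifrar_mensagem mensagem → Spec_cifrar_mensagem mensagem (cifrar_mensagem mensagem)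

-- ===== LEMMAS AND PROOFS =====

-- on every domain character, A's chunk is exactly B's translated character
theorem chunk_eq_table (c : Char) (h : pvDomChar c = true) :
    cifrarChunkA c = [(cifrarTable.get? c).getD c] := by
  have hlt : c.toNat < 127 := by
    simp [pvDomChar] at h
    omega
  have hall : (List.range 127).all
      (fun n => decide (cifrarChunkA (Char.ofNat n) =
        [((cifrarTable.get? (Char.ofNat n)).getD (Char.ofNat n))])) = true := by
    set_option maxRecDepth 8000 in decide
  have := List.all_eq_true.mp hall c.toNat (List.mem_range.mpr hlt)
  simpa [Char.ofNat_toNat] using of_decide_eq_true this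

theorem foldl_chunks (l : List Char) (acc : List Char) (h : l.all pvDomChar = true) :
    l.foldl (fun acc c => acc ++ cifrarChunkA c) acc =
      acc ++ l.map (fun c => (cifrarTable.get? c).getD c) := by
  induction l generalizing acc with
  | nil => simp
  | cons c l ih =>
    simp only [List.all_cons, Bool.and_eq_true] at h
    simp [List.foldl_cons, ih _ h.2, chunk_eq_table c h.1]

-- ===== VERDICT (by name: the statement is the Claim_ definition above) =====
theorem cifrar_mensagem_spec : Claim_equal_cifrar_mensagem := by
  intro mensagem hdom
  unfold Spec_cifrar_mensagem cifrar_mensagem cifrar_mensagem_alt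
  rw [foldl_chunks _ _ hdom]
  simp
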